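-- pv_equiv track=rewrite | github.com/MrChompDev/ChompBot | twitch_moderation_tool.py | has_term
-- ===== SOURCE A (Python) =====
-- def has_term(text: str, terms: set[str]) -> bool:
--     words = set(text.split())
--     for term in terms:
--         if " " in term:
--             if term in text:
--                 return True
--         elif term in words:
--             return True
--     return False
-- ===== SOURCE B (Python) =====
-- def has_term(text: str, terms: set[str]) -> bool:
--     term_set = set(terms)
--     for w in text.split():
--         if w in term_set:
--             return True
--     phrases = [t for t in terms if " " in t]
--     for i in range(len(text) + 1):
--         tail = text[i:]
--         for p in phrases:
--             if tail.startswith(p):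
--                 return True
--     return False
-- ===== Notes on version B (the rewrite author's own statement) =====
-- stated objective: alternative
-- what changed: Replaced A's term-driven loop (each term tested with the built-in substring operator or word-set membership) by a text-driven search: B iterates over the text's tokens checking them against a set of the terms, and hand-rolls the phrase substring search by scanning every start position of the text and testing startswith.
import Mathlib
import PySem

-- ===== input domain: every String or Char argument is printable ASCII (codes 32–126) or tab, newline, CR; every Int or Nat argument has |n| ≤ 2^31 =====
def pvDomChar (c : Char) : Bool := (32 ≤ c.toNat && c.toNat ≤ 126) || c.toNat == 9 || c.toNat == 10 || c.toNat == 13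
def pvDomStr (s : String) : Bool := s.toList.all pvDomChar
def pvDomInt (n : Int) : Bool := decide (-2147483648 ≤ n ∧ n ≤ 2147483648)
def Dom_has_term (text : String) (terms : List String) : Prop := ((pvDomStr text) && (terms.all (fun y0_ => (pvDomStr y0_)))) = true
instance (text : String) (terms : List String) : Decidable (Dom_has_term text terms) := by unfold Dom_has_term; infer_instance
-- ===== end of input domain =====

-- B is text-driven instead of term-driven: it checks the text's tokens against the term set, then
-- hand-rolls the phrase substring search by scanning every start position of the text with startswith
-- (alternative algorithm; return value proved equal).


-- ===== PORT A =====
-- the 'for term in terms' loop with its two early returns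
def hasTermLoopA (text : String) (words : PySem.Set String) : List String → Bool
  | [] => false
  | term :: rest =>
    if PySem.Str.isIn " " term then
      if PySem.Str.isIn term text then true else hasTermLoopA text words rest
    else if PySem.Set.contains words term then true
    else hasTermLoopA text words rest

def has_term (text : String) (terms : List String) : Bool :=
  hasTermLoopA text (PySem.Set.ofList (PySem.Str.split₀ text)) terms

-- ===== PORT B =====
-- token loop ('for w in text.split(): if w in term_set'), then the hand-rolled substring scan
-- ('for i in range(len(text)+1): for p in phrases: if text[i:].startswith(p)')
def has_term_alt (text : String) (terms : List String) : Bool :=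
  if (PySem.Str.split₀ text).any (fun w => PySem.Set.contains (PySem.Set.ofList terms) w) then true
  else
    (PySem.List.pyRange 0 (PySem.Str.len text + 1) 1).any (fun i =>
      (terms.filter (fun t => PySem.Str.isIn " " t)).any (fun p =>
        PySem.Str.startswith (PySem.Str.slice text (some i) none) p))

-- ===== PRECONDITION & SPEC =====
def Spec_has_term (text : String) (terms : List String) (out : Bool) : Prop := out = has_term_alt text terms
instance (text : String) (terms : List String) (out : Bool) : Decidable (Spec_has_term text terms out) := by unfold Spec_has_term; infer_instance

-- ===== CLAIM (what is proved, stated in full; the proofs are below) =====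
def Claim_equal_has_term : Prop := ∀ (text : String) (terms : List String), Dom_has_term text terms → Spec_has_term text terms (has_term text terms)

-- ===== LEMMAS AND PROOFS =====
theorem loopA_eq_any (text : String) (words : PySem.Set String) (l : List String) :
    hasTermLoopA text words l
      = l.any (fun t => if PySem.Str.isIn " " t then PySem.Str.isIn t text
                        else PySem.Set.contains words t) := by
  induction l with
  | nil => rfl
  | cons t rest ih =>
    by_cases h1 : PySem.Str.isIn " " t = true
    · cases hb : PySem.Str.isIn t text <;>
        simp only [hasTermLoopA, List.any_cons, h1, hb, if_true, Bool.false_eq_true, if_false, ih,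
          Bool.true_or, Bool.false_or]
    · have h1' : PySem.Str.isIn " " t = false := Bool.eq_false_iff.mpr h1
      cases hc : PySem.Set.contains words t <;>
        simp only [hasTermLoopA, List.any_cons, h1', hc, Bool.false_eq_true, if_false, if_true, ih,
          Bool.true_or, Bool.false_or]

-- every token produced by split₀.go consists of non-space characters
theorem go_spacefree (s : List Char) : ∀ (cur : List Char) (acc : List (List Char)),
    (∀ c ∈ cur, PySem.Chars.isspace c = false) →
    (∀ w ∈ acc, ∀ c ∈ w, PySem.Chars.isspace c = false) →
    ∀ w ∈ PySem.Chars.split₀.go s cur acc, ∀ c ∈ w, PySem.Chars.isspace c = false := by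
  induction s with
  | nil =>
    intro cur acc hcur hacc w hw
    rw [PySem.Chars.split₀.go.eq_def] at hw
    dsimp only at hw
    by_cases hc : cur.isEmpty = true
    · rw [if_pos hc] at hw
      rw [List.mem_reverse] at hw
      exact hacc w hw
    · rw [if_neg hc] at hw
      rw [List.mem_reverse, List.mem_cons] at hw
      rcases hw with h | h
      · subst h; intro c hc'; exact hcur c (List.mem_reverse.mp hc')
      · exact hacc w h
  | cons c rest ih =>
    intro cur acc hcur hacc w hw
    rw [PySem.Chars.split₀.go.eq_def] at hw
    dsimp only at hw
    by_cases hs : PySem.Chars.isspace c = true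
    · rw [if_pos hs] at hw
      by_cases hc : cur.isEmpty = true
      · rw [if_pos hc] at hw
        exact ih [] acc (by intro c hc'; cases hc') hacc w hw
      · rw [if_neg hc] at hw
        refine ih [] (cur.reverse :: acc) (by intro c hc'; cases hc') ?_ w hw
        intro v hv
        rcases List.mem_cons.mp hv with h | h
        · subst h; intro d hd; exact hcur d (List.mem_reverse.mp hd)
        · exact hacc v h
    · rw [if_neg hs] at hw
      refine ih (c :: cur) acc ?_ hacc w hw
      intro d hd
      rcases List.mem_cons.mp hd with h | h
      · subst h; exact Bool.eq_false_iff.mpr hs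
      · exact hcur d h

-- a token of text.split() never contains a space, so 'isIn " " w' is false
theorem token_no_space (text : String) (w : String) (hw : w ∈ PySem.Str.split₀ text) :
    PySem.Str.isIn " " w = false := by
  have hmem : w.toList ∈ PySem.Chars.split₀ text.toList := by
    rw [← PySem.Str.split₀_map_toList]
    exact List.mem_map_of_mem hw
  have hfree : ∀ c ∈ w.toList, PySem.Chars.isspace c = false :=
    go_spacefree text.toList [] []
      (by intro c hc; cases hc) (by intro v hv; cases hv) w.toList hmem
  cases h : PySem.Str.isIn " " w with
  | false => rfl
  | true =>
    exfalso
    have hinf := (PySem.Str.isIn_iff_infix " " w).mp h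
    have hmemsp : ' ' ∈ w.toList := hinf.subset (by decide)
    have h2 : PySem.Chars.isspace ' ' = true := by decide
    rw [hfree ' ' hmemsp] at h2
    cases h2

theorem has_term_eq_alt (text : String) (terms : List String) :
    has_term text terms = has_term_alt text terms := by
  unfold has_term has_term_alt
  rw [loopA_eq_any]
  by_cases htok : (PySem.Str.split₀ text).any
      (fun w => PySem.Set.contains (PySem.Set.ofList terms) w) = true
  · rw [if_pos htok]
    obtain ⟨w, hwmem, hwset⟩ := List.any_eq_true.mp htok
    rw [List.any_eq_true]
    refine ⟨w, (PySem.Set.mem_ofList terms w).mp ((PySem.Set.contains_iff _ _).mp hwset), ?_⟩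
    rw [if_neg (by rw [token_no_space text w hwmem]; exact Bool.false_ne_true)]
    exact (PySem.Set.contains_iff _ _).mpr ((PySem.Set.mem_ofList _ _).mpr hwmem)
  · rw [if_neg htok]
    apply Bool.eq_iff_iff.mpr
    simp only [List.any_eq_true, List.mem_filter]
    constructor
    · rintro ⟨t, ht, hcond⟩
      by_cases hsp : PySem.Str.isIn " " t = true
      · rw [if_pos hsp] at hcond
        obtain ⟨j, hj⟩ := (PySem.Chars.exists_prefix_drop_iff_isIn t.toList text.toList).mpr
          ((PySem.Chars.isIn_iff_infix _ _).mpr ((PySem.Str.isIn_iff_infix t text).mp hcond))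
        have htne : t.toList ≠ [] := by
          intro h0
          have hinf := (PySem.Str.isIn_iff_infix " " t).mp hsp
          rw [h0] at hinf
          have : (" " : String).toList = [] := List.eq_nil_of_infix_nil hinf
          cases this
        have hjle : j ≤ text.toList.length := by
          by_cases h : text.toList.length ≤ j
          · exfalso
            rw [List.drop_eq_nil_of_le h] at hj
            exact htne (List.prefix_nil.mp hj)
          · omega
        refine ⟨(j : Int), ?_, t, ⟨ht, hsp⟩, ?_⟩
        · rw [PySem.List.mem_pyRange_one, PySem.Str.len_eq]
          constructor
          · exact Int.natCast_nonneg j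
          · omega
        · rw [PySem.Str.startswith_eq, PySem.Chars.startswith_iff, PySem.Str.toList_slice,
            PySem.Chars.slice_eq_listSlice, PySem.List.slice_from_natCast]
          exact hj
      · have hsp' : PySem.Str.isIn " " t = false := Bool.eq_false_iff.mpr hsp
        rw [if_neg hsp] at hcond
        exfalso
        apply htok
        rw [List.any_eq_true]
        refine ⟨t, ?_, ?_⟩
        · exact (PySem.Set.mem_ofList _ _).mp ((PySem.Set.contains_iff _ _).mp hcond)
        · exact (PySem.Set.contains_iff _ _).mpr ((PySem.Set.mem_ofList _ _).mpr ht)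
    · rintro ⟨i, hi, p, ⟨hp, hpsp⟩, hstart⟩
      refine ⟨p, hp, ?_⟩
      rw [if_pos hpsp]
      rw [PySem.List.mem_pyRange_one] at hi
      rw [PySem.Str.startswith_eq, PySem.Chars.startswith_iff, PySem.Str.toList_slice,
        PySem.Chars.slice_eq_listSlice, PySem.List.slice_from text.toList hi.1] at hstart
      rw [PySem.Str.isIn_iff_infix]
      exact (PySem.Chars.isIn_iff_infix _ _).mp
        ((PySem.Chars.exists_prefix_drop_iff_isIn p.toList text.toList).mp ⟨i.toNat, hstart⟩)

-- ===== VERDICT (by name: the statement is the Claim_ definition above) =====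
theorem has_term_spec : Claim_equal_has_term := by
  intro text terms _
  unfold Spec_has_term
  exact has_term_eq_alt text terms
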